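-- pv_equiv track=rewrite | github.com/nightjuggler/aoc | 2019/04.py | part2valid
-- ===== SOURCE A (Python) =====
-- def part2valid(password, double):
-- 	prev = password[double]
-- 	repeat = 2
-- 	for c in password[double + 1:]:
-- 		if c == prev:
-- 			repeat += 1
-- 		elif repeat == 2:
-- 			return True
-- 		else:
-- 			prev = c
-- 			repeat = 1
-- 	return repeat == 2
-- ===== SOURCE B (Python) =====
-- def part2valid(password, double):
--     seq = password[double] * 2 + password[double + 1:]
--     runs = []  # run-length encoding of seq, most recent run first
--     for c in seq:
--         if runs and runs[0][0] == c:
--             runs[0] = (c, runs[0][1] + 1)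
--         else:
--             runs.insert(0, (c, 1))
--     return any(n == 2 for _, n in runs)
-- ===== Notes on version B (the rewrite author's own statement) =====
-- stated objective: alternative
-- what changed: Replaced the incremental prev/repeat scan with early return by building the full run-length encoding of password[double]*2 + password[double+1:] and checking whether any run has length exactly 2.
import Mathlib
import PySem

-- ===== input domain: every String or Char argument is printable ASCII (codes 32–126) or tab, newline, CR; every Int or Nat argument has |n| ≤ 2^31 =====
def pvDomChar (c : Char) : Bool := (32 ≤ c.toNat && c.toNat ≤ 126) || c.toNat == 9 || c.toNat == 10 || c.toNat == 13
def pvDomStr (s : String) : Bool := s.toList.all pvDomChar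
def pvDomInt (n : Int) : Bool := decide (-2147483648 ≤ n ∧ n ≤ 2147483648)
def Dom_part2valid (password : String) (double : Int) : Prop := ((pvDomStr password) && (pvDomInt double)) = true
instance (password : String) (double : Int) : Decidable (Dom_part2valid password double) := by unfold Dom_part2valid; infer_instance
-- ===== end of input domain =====

-- B builds the run-length encoding of password[double]*2 + password[double+1:] and checks
-- for a run of length exactly 2, instead of A's incremental prev/repeat scan (alternative; same cost).


-- ===== PORT A =====
-- the for-loop over password[double+1:] with state (prev, repeat) and early return
def part2loopA : List Char → Char → Int → Bool
  | [], _, repeatc => repeatc == 2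
  | c :: rest, prev, repeatc =>
    if c == prev then part2loopA rest prev (repeatc + 1)
    else if repeatc == 2 then true
    else part2loopA rest c 1

def part2valid (password : String) (double : Int) : Bool :=
  match PySem.List.pyGet? password.toList double with
  | none => false  -- password[double] raises IndexError; excluded by Pre_
  | some prev => part2loopA (PySem.List.slice password.toList (some (double + 1)) none) prev 2

-- ===== PORT B =====
-- one step of B's loop: extend the most recent run or start a new one (runs kept most recent first)
def part2rleStep : List (Char × Int) → Char → List (Char × Int)
  | [], c => [(c, 1)]
  | (p, n) :: t, c => if p == c then (p, n + 1) :: t else (c, 1) :: (p, n) :: t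

def part2valid_alt (password : String) (double : Int) : Bool :=
  match PySem.List.pyGet? password.toList double with
  | none => false  -- password[double] raises IndexError; excluded by Pre_
  | some c =>
    let seq := c :: c :: PySem.List.slice password.toList (some (double + 1)) none
    (seq.foldl part2rleStep []).any (fun pn => pn.2 == 2)

-- ===== PRECONDITION & SPEC =====
-- Pre_ excludes exactly the inputs where password[double] raises IndexError in both A and B.
def Pre_part2valid (password : String) (double : Int) : Prop :=
  PySem.Raise.InRange password.toList.length double
instance (password : String) (double : Int) : Decidable (Pre_part2valid password double) := by
  unfold Pre_part2valid; infer_instance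
def pvWitness_part2valid : String × Int := ("112", 0)

def Spec_part2valid (password : String) (double : Int) (out : Bool) : Prop := out = part2valid_alt password double
instance (password : String) (double : Int) (out : Bool) : Decidable (Spec_part2valid password double out) := by unfold Spec_part2valid; infer_instance

-- ===== CLAIM (what is proved, stated in full; the proofs are below) =====
def Claim_equal_part2valid : Prop := ∀ (password : String) (double : Int), Dom_part2valid password double → Pre_part2valid password double → Spec_part2valid password double (part2valid password double)

-- ===== LEMMAS AND PROOFS =====
-- A's scan with state (p, n), disjoined with "some finished run in t has length 2",
-- equals B's check over the run-length encoding accumulated onto (p, n) :: t.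
lemma part2_key (xs : List Char) (p : Char) (n : Int) (t : List (Char × Int)) :
    (part2loopA xs p n || t.any (fun pn => pn.2 == 2))
      = (xs.foldl part2rleStep ((p, n) :: t)).any (fun pn => pn.2 == 2) := by
  induction xs generalizing p n t with
  | nil => simp [part2loopA]
  | cons c rest ih =>
    by_cases hc : c = p
    · subst hc
      simp only [part2loopA, List.foldl, part2rleStep, beq_self_eq_true, if_true]
      exact ih c (n + 1) t
    · simp only [part2loopA, List.foldl, part2rleStep,
        beq_iff_eq, if_neg hc, if_neg (Ne.symm hc)]
      rw [← ih c 1 ((p, n) :: t)]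
      by_cases hn : n = 2
      · simp [hn]
      · have h2 : (n == 2) = false := by simpa using hn
        simp [h2, hn]

-- ===== VERDICT (by name: the statement is the Claim_ definition above) =====
theorem part2valid_spec : Claim_equal_part2valid := by
  intro password double _ hpre
  unfold Spec_part2valid part2valid part2valid_alt
  cases h : PySem.List.pyGet? password.toList double with
  | none =>
    exact absurd hpre (by simpa [PySem.List.pyGet?_eq_none_iff] using h)
  | some c =>
    simp only [List.foldl]
    have hstep : part2rleStep (part2rleStep [] c) c = [(c, 2)] := by
      simp [part2rleStep]
    rw [hstep]
    have := part2_key (PySem.List.slice password.toList (some (double + 1)) none) c 2 []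
    simpa using this
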